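-- pv_equiv track=rewrite | github.com/leilei180827/covid19-tracker-fullstack | backend/scrapy/scrapy.py | makeQueries
-- ===== SOURCE A (Python) =====
-- def makeQueries(one_row):
--     create_queries = ['', '', '']
--     insert_queries = ['', '', '']
--     for item in one_row.keys():
--         insert_column = f'%s,'
--         column = f'{item.lower()} int(11),'
--         if ("deaths" in item.lower()):
--             create_queries[1] += column
--             insert_queries[1] += insert_column
--         elif ("tests" in item.lower()):
--             create_queries[2] += column
--             insert_queries[2] += insert_column
--         elif (item.lower() == 'date'):
--             column = f'date_reported bigint,'
--             for i in range(len(create_queries)):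
--                 create_queries[i] += column
--                 insert_queries[i] += insert_column
--         else:
--             create_queries[0] += column
--             insert_queries[0] += insert_column
--     return create_queries, insert_queries
-- ===== SOURCE B (Python) =====
-- def makeQueries(one_row):
--     keys = list(one_row.keys())
--
--     def pick(t, k):
--         kl = k.lower()
--         if 'deaths' in kl:
--             return kl + ' int(11),' if t == 1 else None
--         if 'tests' in kl:
--             return kl + ' int(11),' if t == 2 else None
--         if kl == 'date':
--             return 'date_reported bigint,'
--         return kl + ' int(11),' if t == 0 else None
--
--     create_queries, insert_queries = [], []
--     for t in range(3):
--         cols = [c for c in (pick(t, k) for k in keys) if c is not None]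
--         create_queries.append(''.join(cols))
--         insert_queries.append('%s,' * len(cols))
--     return create_queries, insert_queries
-- ===== Notes on version B (the rewrite author's own statement) =====
-- stated objective: alternative
-- what changed: B replaces A's single branching pass that mutates six string accumulators by three independent filtering passes: a classifier assigns each key its table (deaths->1, tests->2, date->all, else->0), and each table's create fragment is the join of its selected column texts while its insert fragment is '%s,' repeated the selected-key count.
import Mathlib
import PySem

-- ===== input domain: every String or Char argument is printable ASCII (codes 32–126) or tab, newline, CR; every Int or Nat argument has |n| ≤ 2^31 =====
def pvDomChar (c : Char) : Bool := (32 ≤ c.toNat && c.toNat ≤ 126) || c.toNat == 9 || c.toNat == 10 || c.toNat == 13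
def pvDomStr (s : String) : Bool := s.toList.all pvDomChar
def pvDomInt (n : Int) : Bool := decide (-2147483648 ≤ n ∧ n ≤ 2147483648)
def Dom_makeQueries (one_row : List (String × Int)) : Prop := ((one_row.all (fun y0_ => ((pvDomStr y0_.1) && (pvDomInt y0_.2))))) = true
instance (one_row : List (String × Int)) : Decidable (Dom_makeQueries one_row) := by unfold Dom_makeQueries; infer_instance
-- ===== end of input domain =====

-- B rebuilds each of the three table fragments in its own filtering pass (classifier + join / string-repeat)
-- instead of A's single branching loop mutating six accumulators; objective: alternative decomposition, same cost.


-- ===== PORT A =====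
-- one iteration of A's 'for item in one_row.keys()' loop (state: the two three-element lists)
def pvStepA (st : List String × List String) (item : String) : List String × List String :=
  let insert_column := "%s,"
  let column := PySem.Str.lower item ++ " int(11),"
  if PySem.Str.isIn "deaths" (PySem.Str.lower item) then
    (st.1.set 1 (st.1.getD 1 "" ++ column), st.2.set 1 (st.2.getD 1 "" ++ insert_column))
  else if PySem.Str.isIn "tests" (PySem.Str.lower item) then
    (st.1.set 2 (st.1.getD 2 "" ++ column), st.2.set 2 (st.2.getD 2 "" ++ insert_column))
  else if PySem.Str.lower item = "date" then
    let column := "date_reported bigint,"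
    -- 'for i in range(len(create_queries))' (len is a Nat, so List.range is exact here)
    (List.range st.1.length).foldl
      (fun s i => (s.1.set i (s.1.getD i "" ++ column), s.2.set i (s.2.getD i "" ++ insert_column))) st
  else
    (st.1.set 0 (st.1.getD 0 "" ++ column), st.2.set 0 (st.2.getD 0 "" ++ insert_column))

def makeQueries (one_row : List (String × Int)) : List String × List String :=
  -- one_row.keys(): the dict's distinct keys in first-insertion order
  (PySem.List.dedup (one_row.map Prod.fst)).foldl pvStepA (["", "", ""], ["", "", ""])

-- ===== PORT B =====
-- pick t k: the create-column text key k contributes to table t, or none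
def pvPick (t : Nat) (k : String) : Option String :=
  let kl := PySem.Str.lower k
  if PySem.Str.isIn "deaths" kl then (if t = 1 then some (kl ++ " int(11),") else none)
  else if PySem.Str.isIn "tests" kl then (if t = 2 then some (kl ++ " int(11),") else none)
  else if kl = "date" then some "date_reported bigint,"
  else (if t = 0 then some (kl ++ " int(11),") else none)

-- hand port of Python's  s * n  on a string and a nonnegative count (exact there)
def pvStrRepeat (s : String) (n : Nat) : String :=
  match n with
  | 0 => ""
  | n + 1 => s ++ pvStrRepeat s n

def makeQueries_alt (one_row : List (String × Int)) : List String × List String :=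
  let keys := PySem.List.dedup (one_row.map Prod.fst)
  let cols := fun t => keys.filterMap (pvPick t)
  ((List.range 3).map (fun t => PySem.Str.join "" (cols t)),
   (List.range 3).map (fun t => pvStrRepeat "%s," (cols t).length))

-- ===== PRECONDITION & SPEC =====
def Spec_makeQueries (one_row : List (String × Int)) (out : List String × List String) : Prop := out = makeQueries_alt one_row
instance (one_row : List (String × Int)) (out : List String × List String) : Decidable (Spec_makeQueries one_row out) := by unfold Spec_makeQueries; infer_instance

-- ===== CLAIM (what is proved, stated in full; the proofs are below) =====
def Claim_equal_makeQueries : Prop := ∀ (one_row : List (String × Int)), Dom_makeQueries one_row → Spec_makeQueries one_row (makeQueries one_row)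

-- ===== LEMMAS AND PROOFS =====

-- the fragments B computes, named for the invariant proof
def pvJ (t : Nat) (ks : List String) : String := PySem.Str.join "" (ks.filterMap (pvPick t))
def pvR (t : Nat) (ks : List String) : String := pvStrRepeat "%s," (ks.filterMap (pvPick t)).length

theorem pvJoin_empty_cons (a : String) (l : List String) :
    PySem.Str.join "" (a :: l) = a ++ PySem.Str.join "" l := by
  rw [← String.toList_inj]
  simp [PySem.Str.join, PySem.Chars.join, List.intercalate]
  cases l <;> simp

theorem pvJ_cons_some {t : Nat} {k c : String} (ks : List String) (h : pvPick t k = some c) :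
    pvJ t (k :: ks) = c ++ pvJ t ks := by
  simp [pvJ, h, pvJoin_empty_cons]

theorem pvJ_cons_none {t : Nat} {k : String} (ks : List String) (h : pvPick t k = none) :
    pvJ t (k :: ks) = pvJ t ks := by
  simp [pvJ, h]

theorem pvR_cons_some {t : Nat} {k c : String} (ks : List String) (h : pvPick t k = some c) :
    pvR t (k :: ks) = "%s," ++ pvR t ks := by
  simp [pvR, h, pvStrRepeat]

theorem pvR_cons_none {t : Nat} {k : String} (ks : List String) (h : pvPick t k = none) :
    pvR t (k :: ks) = pvR t ks := by
  simp [pvR, h]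

theorem pvLoop_eq (ks : List String) (c0 c1 c2 i0 i1 i2 : String) :
    ks.foldl pvStepA ([c0, c1, c2], [i0, i1, i2]) =
      ([c0 ++ pvJ 0 ks, c1 ++ pvJ 1 ks, c2 ++ pvJ 2 ks],
       [i0 ++ pvR 0 ks, i1 ++ pvR 1 ks, i2 ++ pvR 2 ks]) := by
  induction ks generalizing c0 c1 c2 i0 i1 i2 with
  | nil => simp [pvJ, pvR, PySem.Str.join, PySem.Chars.join, pvStrRepeat, List.intercalate]
  | cons k ks ih =>
    simp only [List.foldl_cons]
    cases hd : PySem.Chars.isIn ['d','e','a','t','h','s'] (PySem.Chars.lower k.toList) with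
    | true =>
      have p0 : pvPick 0 k = none := by simp [pvPick, hd]
      have p1 : pvPick 1 k = some (PySem.Str.lower k ++ " int(11),") := by simp [pvPick, hd]
      have p2 : pvPick 2 k = none := by simp [pvPick, hd]
      simp [pvStepA, hd, ih, pvJ_cons_some _ p1, pvJ_cons_none _ p0, pvJ_cons_none _ p2,
            pvR_cons_some _ p1, pvR_cons_none _ p0, pvR_cons_none _ p2, String.append_assoc]
    | false =>
      cases ht : PySem.Chars.isIn ['t','e','s','t','s'] (PySem.Chars.lower k.toList) with
      | true =>
        have p0 : pvPick 0 k = none := by simp [pvPick, hd, ht]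
        have p1 : pvPick 1 k = none := by simp [pvPick, hd, ht]
        have p2 : pvPick 2 k = some (PySem.Str.lower k ++ " int(11),") := by simp [pvPick, hd, ht]
        simp [pvStepA, hd, ht, ih, pvJ_cons_some _ p2, pvJ_cons_none _ p0, pvJ_cons_none _ p1,
              pvR_cons_some _ p2, pvR_cons_none _ p0, pvR_cons_none _ p1, String.append_assoc]
      | false =>
        by_cases hdate : PySem.Str.lower k = "date"
        · have p0 : pvPick 0 k = some "date_reported bigint," := by (simp [pvPick, hdate]; decide)
          have p1 : pvPick 1 k = some "date_reported bigint," := by (simp [pvPick, hdate]; decide)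
          have p2 : pvPick 2 k = some "date_reported bigint," := by (simp [pvPick, hdate]; decide)
          have e1 : PySem.Chars.isIn ['d','e','a','t','h','s'] ['d','a','t','e'] = false := by decide
          have e2 : PySem.Chars.isIn ['t','e','s','t','s'] ['d','a','t','e'] = false := by decide
          simp [pvStepA, hdate, e1, e2, List.range_succ, ih,
                pvJ_cons_some _ p0, pvJ_cons_some _ p1, pvJ_cons_some _ p2,
                pvR_cons_some _ p0, pvR_cons_some _ p1, pvR_cons_some _ p2, String.append_assoc]
        · have p0 : pvPick 0 k = some (PySem.Str.lower k ++ " int(11),") := by simp [pvPick, hd, ht, hdate]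
          have p1 : pvPick 1 k = none := by simp [pvPick, hd, ht, hdate]
          have p2 : pvPick 2 k = none := by simp [pvPick, hd, ht, hdate]
          simp [pvStepA, hd, ht, hdate, ih, pvJ_cons_some _ p0, pvJ_cons_none _ p1, pvJ_cons_none _ p2,
                pvR_cons_some _ p0, pvR_cons_none _ p1, pvR_cons_none _ p2, String.append_assoc]

-- ===== VERDICT (by name: the statement is the Claim_ definition above) =====
theorem makeQueries_spec : Claim_equal_makeQueries := by
  intro one_row _
  unfold Spec_makeQueries makeQueries makeQueries_alt
  rw [pvLoop_eq]
  simp [pvJ, pvR, List.range_succ]
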